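-- pv_equiv track=rewrite | github.com/serhiizx/goit-algo-hw-06 | algos.py | bfs_find_path
-- ===== SOURCE A (Python) =====
-- from collections import deque
--
-- def bfs_find_path(graph, start, end):
--     visited = set()
--     queue = deque([start])
--     parent = {start: None}
--
--     while queue:
--         vertex = queue.popleft()
--         if vertex not in visited:
--             visited.add(vertex)
--
--             if vertex == end:
--                 path = []
--                 while vertex is not None:
--                     path.append(vertex)
--                     vertex = parent[vertex]
--                 return path[::-1]
--
--             for neighbor in set(graph[vertex]) - visited:
--                 if neighbor not in parent:
--                     parent[neighbor] = vertex
--                 queue.append(neighbor)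
--     return []
-- ===== SOURCE B (Python) =====
-- from collections import deque
--
-- def bfs_find_path(graph, start, end):
--     # Queue-of-paths BFS: each queue entry carries the whole path to its vertex,
--     # so no parent dict and no back-tracking reconstruction are needed.
--     visited = set()
--     queue = deque([[start]])
--     while queue:
--         path = queue.popleft()
--         vertex = path[-1]
--         if vertex in visited:
--             continue
--         visited.add(vertex)
--         if vertex == end:
--             return path
--         for neighbor in set(graph[vertex]) - visited:
--             queue.append(path + [neighbor])
--     return []
-- ===== Notes on version B (the rewrite author's own statement) =====
-- stated objective: simpler
-- what changed: Replaces the parent-pointer dict and the back-tracking reconstruction loop by a queue-of-paths BFS: each queue entry stores the full path to its vertex, so the answer is returned as-is when the target is popped; processing order and tie-breaking (set(graph[vertex]) - visited) are preserved.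
import Mathlib
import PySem

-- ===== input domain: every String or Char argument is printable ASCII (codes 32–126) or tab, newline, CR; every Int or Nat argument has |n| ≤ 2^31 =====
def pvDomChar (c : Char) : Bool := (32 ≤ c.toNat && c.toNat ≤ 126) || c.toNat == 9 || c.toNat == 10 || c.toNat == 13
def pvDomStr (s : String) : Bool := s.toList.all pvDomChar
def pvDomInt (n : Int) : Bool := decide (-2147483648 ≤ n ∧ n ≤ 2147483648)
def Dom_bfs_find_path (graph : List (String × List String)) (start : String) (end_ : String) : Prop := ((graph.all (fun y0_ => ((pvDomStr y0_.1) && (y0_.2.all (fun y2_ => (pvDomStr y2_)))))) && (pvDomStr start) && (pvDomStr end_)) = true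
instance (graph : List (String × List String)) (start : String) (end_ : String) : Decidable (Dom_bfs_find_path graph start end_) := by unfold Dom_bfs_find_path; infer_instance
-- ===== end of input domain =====

-- B replaces A's parent-pointer dict + back-tracking reconstruction by a queue-of-paths BFS (simpler decomposition, same traversal and tie-breaking).

-- ===== PORT A =====
-- the reconstruction loop 'while vertex is not None: path.append(vertex); vertex = parent[vertex]' then 'path[::-1]';
-- fuel (never exhausted in an actual run); a missing key would raise KeyError in Python, here '.join' stops — unreachable under A's own invariant
def bfsBacktrack (parent : PySem.Dict String (Option String)) : Nat → Option String → List String → List String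
  | 0, _, path => path.reverse
  | _+1, none, path => path.reverse
  | f+1, some v, path => bfsBacktrack parent f ((parent.get? v).join) (path ++ [v])

-- the 'while queue:' loop; fuel bounds the number of pops (≤ 1 + total adjacency length, see bfs_find_path)
def bfsLoopA (graph : List (String × List String)) (end_ : String) :
    Nat → PySem.Set String → List String → PySem.Dict String (Option String) → List String
  | 0, _, _, _ => []
  | _+1, _, [], _ => []
  | f+1, visited, v :: rest, parent =>
    if PySem.Set.contains visited v then
      bfsLoopA graph end_ f visited rest parent
    else
      let visited' := PySem.Set.add visited v
      if v == end_ then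
        bfsBacktrack parent (parent.size + 1) (some v) []
      else
        match graph.lookup v with
        | none => []  -- Python raises KeyError here (excluded by Pre_)
        | some l =>
          -- 'for neighbor in set(graph[vertex]) - visited: if neighbor not in parent: parent[neighbor] = vertex; queue.append(neighbor)'
          let st := (PySem.Set.diff (PySem.Set.ofList l) visited').foldl
              (fun (pq : PySem.Dict String (Option String) × List String) n =>
                (if pq.1.contains n then pq.1 else pq.1.insert n (some v), pq.2 ++ [n]))
              (parent, rest)
          bfsLoopA graph end_ f visited' st.2 st.1

def bfs_find_path (graph : List (String × List String)) (start : String) (end_ : String) : List String :=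
  bfsLoopA graph end_ (2 + (graph.map (fun p => p.2.length)).sum) PySem.Set.empty [start]
    ((PySem.Dict.empty : PySem.Dict String (Option String)).insert start none)

-- ===== PORT B =====
def bfsLoopB (graph : List (String × List String)) (end_ : String) :
    Nat → PySem.Set String → List (List String) → List String
  | 0, _, _ => []
  | _+1, _, [] => []
  | f+1, visited, p :: rest =>
    let v := (PySem.List.pyGet? p (-1)).getD ""   -- path[-1]; queue paths are never empty
    if PySem.Set.contains visited v then
      bfsLoopB graph end_ f visited rest
    else
      let visited' := PySem.Set.add visited v
      if v == end_ then p
      else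
        match graph.lookup v with
        | none => []  -- Python raises KeyError here (excluded by Pre_)
        | some l =>
          bfsLoopB graph end_ f visited'
            (rest ++ (PySem.Set.diff (PySem.Set.ofList l) visited').map (fun n => p ++ [n]))

def bfs_find_path_alt (graph : List (String × List String)) (start : String) (end_ : String) : List String :=
  bfsLoopB graph end_ (2 + (graph.map (fun p => p.2.length)).sum) PySem.Set.empty [[start]]

-- ===== PRECONDITION & SPEC =====
-- Pre_ excludes inputs where BFS may look up a vertex that is not a dict key (Python raises KeyError there).
-- It is conservative (a narrowing): it also excludes graphs with a dangling neighbor (neither a key nor the target)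
-- that A happens never to look up because the target is found first — on those A returns normally.
def Pre_bfs_find_path (graph : List (String × List String)) (start : String) (end_ : String) : Prop :=
  start = end_ ∨ (start ∈ graph.map (·.1) ∧ ∀ p ∈ graph, ∀ v ∈ p.2, v = end_ ∨ v ∈ graph.map (·.1))
instance (graph : List (String × List String)) (start : String) (end_ : String) : Decidable (Pre_bfs_find_path graph start end_) := by unfold Pre_bfs_find_path; infer_instance
def pvWitness_bfs_find_path : (List (String × List String)) × String × String :=
  ([("a", ["b"]), ("b", [])], "a", "b")
def Spec_bfs_find_path (graph : List (String × List String)) (start : String) (end_ : String) (out : List String) : Prop := out = bfs_find_path_alt graph start end_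
instance (graph : List (String × List String)) (start : String) (end_ : String) (out : List String) : Decidable (Spec_bfs_find_path graph start end_ out) := by unfold Spec_bfs_find_path; infer_instance

-- ===== CLAIM (what is proved, stated in full; the proofs are below) =====
def Claim_equal_bfs_find_path : Prop := ∀ (graph : List (String × List String)) (start : String) (end_ : String), Dom_bfs_find_path graph start end_ → Pre_bfs_find_path graph start end_ → Spec_bfs_find_path graph start end_ (bfs_find_path graph start end_)

-- ===== LEMMAS AND PROOFS =====
-- (the equivalence is a bisimulation: A's queue is the last-vertex image of B's queue of paths, and each
-- first-occurrence entry of B's queue stores exactly A's parent chain of its last vertex)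

-- Python's path[-1]
def pvLastOf (p : List String) : String := (PySem.List.pyGet? p (-1)).getD ""

-- 'p is the parent chain of o' (root-first, as A's reconstruction returns it)
inductive pvIsChain (parent : PySem.Dict String (Option String)) : Option String → List String → Prop
  | nil : pvIsChain parent none []
  | cons {v : String} {o : Option String} {p : List String} :
      parent.get? v = some o → pvIsChain parent o p → pvIsChain parent (some v) (p ++ [v])

def pvEntryOK (visited : PySem.Set String) (parent : PySem.Dict String (Option String))
    (pre : List String) (p : List String) : Prop :=
  p ≠ [] ∧ (pvLastOf p ∈ visited ∨ pvLastOf p ∈ pre ∨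
    (pvIsChain parent (some (pvLastOf p)) p ∧ p.Nodup))

def pvQInv (visited : PySem.Set String) (parent : PySem.Dict String (Option String)) :
    List String → List (List String) → Prop
  | _, [] => True
  | pre, p :: rest => pvEntryOK visited parent pre p ∧ pvQInv visited parent (pre ++ [pvLastOf p]) rest

def pvInv (visited : PySem.Set String) (parent : PySem.Dict String (Option String))
    (pq : List (List String)) : Prop :=
  (∀ k ∈ parent.keys, k ∈ visited ∨ ∃ p ∈ pq, pvLastOf p = k) ∧
  pvQInv visited parent [] pq ∧ parent.keys.Nodup

theorem pvLastOf_append (p : List String) (n : String) : pvLastOf (p ++ [n]) = n := by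
  simp [pvLastOf, PySem.List.pyGet?_neg_one_append_singleton]

theorem pvChain_extend {parent parent' : PySem.Dict String (Option String)} {o : Option String} {p : List String}
    (hext : ∀ k o', parent.get? k = some o' → parent'.get? k = some o')
    (h : pvIsChain parent o p) : pvIsChain parent' o p := by
  induction h with
  | nil => exact pvIsChain.nil
  | cons hg _ ih => exact pvIsChain.cons (hext _ _ hg) ih

theorem pvChain_keys {parent : PySem.Dict String (Option String)} {o : Option String} {p : List String}
    (h : pvIsChain parent o p) : ∀ x ∈ p, x ∈ parent.keys := by
  induction h with
  | nil => intro x hx; simp at hx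
  | cons hg _ ih =>
    intro x hx
    rcases List.mem_append.1 hx with hx | hx
    · exact ih x hx
    · rw [List.mem_singleton] at hx
      subst hx
      by_contra hc
      rw [← PySem.Dict.get?_eq_none_iff_not_mem_keys] at hc
      simp [hc] at hg

theorem pvBacktrack_eq {parent : PySem.Dict String (Option String)} {o : Option String} {p : List String}
    (h : pvIsChain parent o p) : ∀ f, p.length ≤ f → ∀ acc,
    bfsBacktrack parent f o acc = (acc ++ p.reverse).reverse := by
  induction h with
  | nil =>
    intro f _ acc
    cases f <;> simp [bfsBacktrack]
  | cons hg _ ih =>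
    intro f hf acc
    cases f with
    | zero => simp at hf
    | succ f' =>
      simp only [bfsBacktrack, hg, Option.join_some]
      rw [ih f' (by simp at hf; omega) (acc ++ _)]
      simp

theorem pvChain_len {parent : PySem.Dict String (Option String)} {v : String} {p : List String}
    (h : pvIsChain parent (some v) p) (hnd : p.Nodup) : p.length ≤ parent.size := by
  have hs : p ⊆ parent.keys := fun x hx => pvChain_keys h x hx
  have hk : parent.keys.length = parent.size := by
    simp [PySem.Dict.keys, PySem.Dict.size]
  calc p.length = p.toFinset.card := (List.toFinset_card_of_nodup hnd).symm
    _ ≤ parent.keys.toFinset.card := Finset.card_le_card (by intro x hx; simp at *; exact hs hx)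
    _ ≤ parent.keys.length := parent.keys.toFinset_card_le
    _ = parent.size := hk

theorem pvQInv_mono {visited visited' : PySem.Set String}
    {parent parent' : PySem.Dict String (Option String)} {pre pre' : List String}
    {pq : List (List String)}
    (h : pvQInv visited parent pre pq)
    (hv : ∀ x, x ∈ visited → x ∈ visited')
    (hp : ∀ x ∈ pre, x ∈ visited' ∨ x ∈ pre')
    (hext : ∀ k o', parent.get? k = some o' → parent'.get? k = some o') :
    pvQInv visited' parent' pre' pq := by
  induction pq generalizing pre pre' with
  | nil => trivial
  | cons p rest ih =>
    obtain ⟨⟨hne, hj⟩, htail⟩ := h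
    refine ⟨⟨hne, ?_⟩, ih htail ?_⟩
    · rcases hj with hj | hj | hj
      · exact Or.inl (hv _ hj)
      · rcases hp _ hj with h' | h'
        · exact Or.inl h'
        · exact Or.inr (Or.inl h')
      · exact Or.inr (Or.inr ⟨pvChain_extend hext hj.1, hj.2⟩)
    · intro x hx
      rcases List.mem_append.1 hx with hx | hx
      · rcases hp _ hx with h' | h'
        · exact Or.inl h'
        · exact Or.inr (List.mem_append.2 (Or.inl h'))
      · exact Or.inr (List.mem_append.2 (Or.inr hx))

theorem pvQInv_append {visited : PySem.Set String} {parent : PySem.Dict String (Option String)}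
    {pre : List String} {xs ys : List (List String)}
    (h1 : pvQInv visited parent pre xs)
    (h2 : pvQInv visited parent (pre ++ xs.map pvLastOf) ys) :
    pvQInv visited parent pre (xs ++ ys) := by
  induction xs generalizing pre with
  | nil => simpa using h2
  | cons p t ih =>
    obtain ⟨hE, ht⟩ := h1
    refine ⟨hE, ih ht ?_⟩
    simpa [List.append_assoc] using h2

def pvStepP (v : String) (ns : List String) (parent : PySem.Dict String (Option String)) :
    PySem.Dict String (Option String) :=
  ns.foldl (fun d n => if d.contains n then d else d.insert n (some v)) parent

theorem pvStepP_get? {v : String} {ns : List String} {parent : PySem.Dict String (Option String)}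
    {k : String} {o : Option String} (hk : parent.get? k = some o) :
    (pvStepP v ns parent).get? k = some o := by
  induction ns generalizing parent with
  | nil => exact hk
  | cons n t ih =>
    simp only [pvStepP, List.foldl_cons] at *
    by_cases hc : parent.contains n
    · simp only [hc, if_true]; exact ih hk
    · simp only [hc, if_false, Bool.false_eq_true]
      apply ih
      have hne : k ≠ n := by
        intro he; subst he
        rw [PySem.Dict.contains_eq_isSome_get?, hk] at hc
        simp at hc
      rw [PySem.Dict.get?_insert_of_ne _ _ hne]
      exact hk

theorem pvStepP_keys {v : String} {ns : List String} {parent : PySem.Dict String (Option String)}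
    {k : String} (hk : k ∈ (pvStepP v ns parent).keys) : k ∈ parent.keys ∨ k ∈ ns := by
  induction ns generalizing parent with
  | nil => exact Or.inl hk
  | cons n t ih =>
    simp only [pvStepP, List.foldl_cons] at hk
    rcases ih hk with h' | h'
    · by_cases hc : parent.contains n
      · simp only [hc, if_true] at h'; exact Or.inl h'
      · simp only [hc, if_false, Bool.false_eq_true] at h'
        rcases (PySem.Dict.mem_keys_insert _ _ _ _).1 h' with h'' | h''
        · exact Or.inr (by simp [h''])
        · exact Or.inl h''
    · exact Or.inr (List.mem_cons_of_mem _ h')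

theorem pvStepP_nodup {v : String} {ns : List String} {parent : PySem.Dict String (Option String)}
    (h : parent.keys.Nodup) : (pvStepP v ns parent).keys.Nodup := by
  induction ns generalizing parent with
  | nil => exact h
  | cons n t ih =>
    simp only [pvStepP, List.foldl_cons]
    apply ih
    by_cases hc : parent.contains n
    · simpa [hc] using h
    · simp only [hc, if_false, Bool.false_eq_true]
      exact PySem.Dict.nodup_keys_insert _ _ _ h

theorem pvStepP_new {v : String} {ns : List String} {parent : PySem.Dict String (Option String)}
    {n : String} (hnd : ns.Nodup) (hn : n ∈ ns) :
    n ∈ parent.keys ∨ (pvStepP v ns parent).get? n = some (some v) := by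
  induction ns generalizing parent with
  | nil => simp at hn
  | cons m t ih =>
    rcases List.mem_cons.1 hn with he | hn'
    · subst he
      by_cases hc : parent.contains n
      · exact Or.inl ((PySem.Dict.contains_iff_mem_keys _ _).1 hc)
      · right
        simp only [pvStepP, List.foldl_cons, hc, if_false, Bool.false_eq_true]
        exact pvStepP_get? (PySem.Dict.get?_insert_self _ _ _)
    · have hnd' : t.Nodup := hnd.of_cons
      have hnm : n ≠ m := fun he => (List.nodup_cons.1 hnd).1 (he ▸ hn')
      simp only [pvStepP, List.foldl_cons]
      by_cases hc : parent.contains m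
      · rcases ih hnd' hn' (parent := if parent.contains m then parent else parent.insert m (some v)) with h' | h'
        · simp only [hc, if_true] at h'; exact Or.inl h'
        · exact Or.inr h'
      · rcases ih hnd' hn' (parent := if parent.contains m then parent else parent.insert m (some v)) with h' | h'
        · simp only [hc, if_false, Bool.false_eq_true] at h'
          rcases (PySem.Dict.mem_keys_insert _ _ _ _).1 h' with h'' | h''
          · exact absurd h'' hnm
          · exact Or.inl h''
        · exact Or.inr h'

theorem pvLastOf_def (p : List String) : pvLastOf p = (PySem.List.pyGet? p (-1)).getD "" := rfl

-- all new queue entries p ++ [n] satisfy the entry invariant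
theorem pvQInv_fresh (visited' : PySem.Set String) (parent' : PySem.Dict String (Option String))
    (p : List String) (v : String)
    (hch : pvIsChain parent' (some v) p) (hnd : p.Nodup) :
    ∀ (ns' pre pre0 : List String), (∀ x ∈ pre0, x ∈ pre) →
    (∀ n ∈ ns', n ∈ pre0 ∨ (parent'.get? n = some (some v) ∧ n ∉ p)) →
    pvQInv visited' parent' pre (ns'.map (fun n => p ++ [n])) := by
  intro ns'
  induction ns' with
  | nil => intro pre pre0 _ _; trivial
  | cons n t ih =>
    intro pre pre0 hsub hall
    refine ⟨⟨by simp, ?_⟩, ?_⟩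
    · rw [pvLastOf_append]
      rcases hall n (List.mem_cons_self) with h' | h'
      · exact Or.inr (Or.inl (hsub _ h'))
      · refine Or.inr (Or.inr ⟨pvIsChain.cons h'.1 hch, ?_⟩)
        simp only [List.nodup_append, List.nodup_singleton, true_and]
        refine ⟨hnd, ?_⟩
        intro a ha b hb
        simp only [List.mem_singleton] at hb
        exact fun he => h'.2 ((hb ▸ he : a = n) ▸ ha)
    · rw [pvLastOf_append]
      exact ih (pre ++ [n]) pre0 (fun x hx => List.mem_append.2 (Or.inl (hsub x hx)))
        (fun m hm => hall m (List.mem_cons_of_mem _ hm))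

theorem pvBisim (graph : List (String × List String)) (end_ : String) :
    ∀ (f : Nat) (visited : PySem.Set String) (parent : PySem.Dict String (Option String))
      (pq : List (List String)), pvInv visited parent pq →
    bfsLoopA graph end_ f visited (pq.map pvLastOf) parent = bfsLoopB graph end_ f visited pq := by
  intro f
  induction f with
  | zero => intro visited parent pq _; simp [bfsLoopA, bfsLoopB]
  | succ f ih =>
    intro visited parent pq hInv
    obtain ⟨KC, QI, ND⟩ := hInv
    cases pq with
    | nil => simp [bfsLoopA, bfsLoopB]
    | cons p rest =>
      obtain ⟨⟨hne, hj⟩, Qtail⟩ := QI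
      simp only [List.map_cons, bfsLoopA, bfsLoopB, ← pvLastOf_def]
      by_cases hvis : PySem.Set.contains visited (pvLastOf p)
      · simp only [hvis, if_true]
        have hvmem : pvLastOf p ∈ visited := (PySem.Set.contains_iff _ _).1 hvis
        refine ih visited parent rest ⟨?_, ?_, ND⟩
        · intro k hk
          rcases KC k hk with h' | ⟨q, hq, hlq⟩
          · exact Or.inl h'
          · rcases List.mem_cons.1 hq with he | hq'
            · exact Or.inl (by rw [← hlq, he]; exact hvmem)
            · exact Or.inr ⟨q, hq', hlq⟩
        · refine pvQInv_mono Qtail (fun x hx => hx) ?_ (fun k o' h => h)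
          intro x hx
          simp only [List.nil_append, List.mem_singleton] at hx
          exact Or.inl (hx ▸ hvmem)
      · simp only [hvis, if_false, Bool.false_eq_true]
        have hvnot : pvLastOf p ∉ visited := fun h => hvis ((PySem.Set.contains_iff _ _).2 h)
        have hch : pvIsChain parent (some (pvLastOf p)) p ∧ p.Nodup := by
          rcases hj with h' | h' | h'
          · exact absurd h' hvnot
          · simp at h'
          · exact h'
        by_cases hend : pvLastOf p == end_
        · simp only [hend, if_true]
          rw [pvBacktrack_eq hch.1 (parent.size + 1)
            (Nat.le_succ_of_le (pvChain_len hch.1 hch.2)) []]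
          simp
        · simp only [hend, if_false, Bool.false_eq_true]
          cases hlook : graph.lookup (pvLastOf p) with
          | none => rfl
          | some l =>
            simp only []
            set visited' := PySem.Set.add visited (pvLastOf p) with hv'
            set ns := PySem.Set.diff (PySem.Set.ofList l) visited' with hns
            rw [PySem.List.foldl_prod_mk
              (f := fun d n => if PySem.Dict.contains d n then d else d.insert n (some (pvLastOf p)))
              (g := fun q n => q ++ [n])]
            rw [PySem.List.foldl_append_singleton_eq_self]
            have hmap : (rest ++ ns.map (fun n => p ++ [n])).map pvLastOf
                = rest.map pvLastOf ++ ns := by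
              simp [List.map_map, Function.comp_def, pvLastOf_append]
            rw [show (ns.foldl (fun d n => if PySem.Dict.contains d n then d else d.insert n (some (pvLastOf p))) parent) = pvStepP (pvLastOf p) ns parent from rfl]
            rw [← hmap]
            -- invariant for the next state
            have hnsnd : ns.Nodup := PySem.Set.nodup_diff _ _ (PySem.Set.nodup_ofList _)
            have hnsvis : ∀ n ∈ ns, n ∉ visited' := fun n h => ((PySem.Set.mem_diff _ _ _).1 h).2
            have hext : ∀ k o', parent.get? k = some o' → (pvStepP (pvLastOf p) ns parent).get? k = some o' :=
              fun k o' h => pvStepP_get? h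
            have hvsub : ∀ x, x ∈ visited → x ∈ visited' :=
              fun x hx => (PySem.Set.mem_add _ _ _).2 (Or.inl hx)
            have hvv : pvLastOf p ∈ visited' := (PySem.Set.mem_add _ _ _).2 (Or.inr rfl)
            refine ih visited' (pvStepP (pvLastOf p) ns parent)
              (rest ++ ns.map (fun n => p ++ [n])) ⟨?_, ?_, pvStepP_nodup ND⟩
            · intro k hk
              rcases pvStepP_keys hk with hk' | hk'
              · rcases KC k hk' with h' | ⟨q, hq, hlq⟩
                · exact Or.inl (hvsub _ h')
                · rcases List.mem_cons.1 hq with he | hq'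
                  · exact Or.inl (by rw [← hlq, he]; exact hvv)
                  · exact Or.inr ⟨q, List.mem_append.2 (Or.inl hq'), hlq⟩
              · exact Or.inr ⟨p ++ [k], List.mem_append.2 (Or.inr (List.mem_map.2 ⟨k, hk', rfl⟩)),
                  pvLastOf_append _ _⟩
            · refine pvQInv_append ?_ ?_
              · refine pvQInv_mono Qtail hvsub ?_ hext
                intro x hx
                simp only [List.nil_append, List.mem_singleton] at hx
                exact Or.inl (hx ▸ hvv)
              · refine pvQInv_fresh visited' _ p (pvLastOf p)
                  (pvChain_extend hext hch.1) hch.2 ns ([] ++ rest.map pvLastOf)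
                  (rest.map pvLastOf) (fun x hx => by simpa using hx) ?_
                intro n hn
                by_cases hnk : n ∈ parent.keys
                · rcases KC n hnk with h' | ⟨q, hq, hlq⟩
                  · exact absurd (hvsub _ h') (hnsvis n hn)
                  · rcases List.mem_cons.1 hq with he | hq'
                    · exact absurd (by rw [← hlq, he]; exact hvv : n ∈ visited') (hnsvis n hn)
                    · exact Or.inl (List.mem_map.2 ⟨q, hq', hlq⟩)
                · rcases pvStepP_new hnsnd hn (parent := parent) (v := pvLastOf p) with h' | h'
                  · exact absurd h' hnk
                  · exact Or.inr ⟨h', fun hp => hnk (pvChain_keys hch.1 n hp)⟩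

-- ===== VERDICT (by name: the statement is the Claim_ definition above) =====
theorem bfs_find_path_spec : Claim_equal_bfs_find_path := by
  intro graph start end_ _hd _hpre
  unfold Spec_bfs_find_path bfs_find_path bfs_find_path_alt
  have h := pvBisim graph end_ (2 + (graph.map (fun p => p.2.length)).sum) PySem.Set.empty
    ((PySem.Dict.empty : PySem.Dict String (Option String)).insert start none) [[start]] ?_
  · simpa [pvLastOf_append ([] : List String) start] using h
  · have hl : pvLastOf [start] = start := pvLastOf_append [] start
    have hkeys : ((PySem.Dict.empty : PySem.Dict String (Option String)).insert start none).keys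
        = [start] := by
      rw [PySem.Dict.keys_insert_of_not_contains]
      · simp [PySem.Dict.keys_empty]
      · simp [PySem.Dict.contains_empty]
    refine ⟨?_, ⟨⟨by simp, Or.inr (Or.inr ⟨?_, by simp⟩)⟩, trivial⟩, by rw [hkeys]; simp⟩
    · intro k hk
      rw [hkeys, List.mem_singleton] at hk
      exact Or.inr ⟨[start], by simp, by rw [hl, hk]⟩
    · rw [hl]
      exact pvIsChain.cons (PySem.Dict.get?_insert_self _ _ _) pvIsChain.nil
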